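-- pv_equiv track=rewrite | github.com/sophiaalthammer/alforrankers | matchmaker/dataloaders/query_generation_inference_loader.py | get_type_idx_for_query
-- ===== SOURCE A (Python) =====
-- from typing import List
--
-- token_groups=[
--         ["what","how","where","who","when","which","why","was","is","can","does","do","are","define","definition","meaning","mean"],
--         ["---other---"]
--     ]
--
-- def get_type_idx_for_query(query:List[str]):
--     found = False
--     found_i = len(token_groups) - 1
--     for i,g_arr in enumerate(token_groups):
--         for token in query:
--             if token in g_arr:
--                 found = True
--                 found_i = i
--                 break
--         if found:
--             break
--     return found_i
-- ===== SOURCE B (Python) =====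
-- from typing import List
--
-- token_groups=[
--         ["what","how","where","who","when","which","why","was","is","can","does","do","are","define","definition","meaning","mean"],
--         ["---other---"]
--     ]
--
-- def get_type_idx_for_query(query: List[str]):
--     tok2grp = {}
--     for i, g_arr in enumerate(token_groups):
--         for token in g_arr:
--             if token not in tok2grp:
--                 tok2grp[token] = i
--     indices = [tok2grp[t] for t in query if t in tok2grp]
--     return min(indices) if indices else len(token_groups) - 1
-- ===== Notes on version B (the rewrite author's own statement) =====
-- stated objective: faster
-- what changed: Replaces the nested scan-with-break over groups by building a token-to-first-group dict once and taking the minimum group index found over the query (default last group).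
import Mathlib
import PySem

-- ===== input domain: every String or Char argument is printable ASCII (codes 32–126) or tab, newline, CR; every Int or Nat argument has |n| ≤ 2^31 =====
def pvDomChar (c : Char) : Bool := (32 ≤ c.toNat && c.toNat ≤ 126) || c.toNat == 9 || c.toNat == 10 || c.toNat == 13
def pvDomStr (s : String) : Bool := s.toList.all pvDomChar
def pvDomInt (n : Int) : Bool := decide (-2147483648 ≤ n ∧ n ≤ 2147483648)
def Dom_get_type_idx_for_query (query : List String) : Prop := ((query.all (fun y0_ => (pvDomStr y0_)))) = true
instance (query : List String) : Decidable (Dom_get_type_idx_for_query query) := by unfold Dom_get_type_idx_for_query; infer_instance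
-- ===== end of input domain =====

-- B builds a token→first-group index once and takes the min matched group index over the query
-- (default: last group), instead of A's nested scan-with-break; alternative decomposition, same result.

-- module-level constant shared by both Pythons
def token_groups : List (List String) :=
  [["what","how","where","who","when","which","why","was","is","can","does","do","are","define","definition","meaning","mean"],
   ["---other---"]]

-- ===== PORT A =====
-- inner 'for token in query: if token in g_arr: … break' — returns whether a match was found
def innerA (g : List String) : List String → Bool
  | [] => false
  | t :: ts => if g.contains t then true else innerA g ts

-- outer 'for i,g_arr in enumerate(token_groups): …; if found: break'
def outerA (query : List String) : List (List String) → Nat → Int → Int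
  | [], _, found_i => found_i
  | g :: gs, i, found_i =>
      if innerA g query then (i : Int) else outerA query gs (i + 1) found_i

def get_type_idx_for_query (query : List String) : Int :=
  outerA query token_groups 0 ((token_groups.length : Int) - 1)

-- ===== PORT B =====
-- tok2grp: token → index of first group containing it
def tok2grp : PySem.Dict String Int :=
  token_groups.zipIdx.foldl
    (fun d gi =>
      gi.1.foldl
        (fun d t => if (PySem.Dict.get? d t).isSome then d else PySem.Dict.insert d t (gi.2 : Int))
        d)
    (PySem.Dict.mk [])

def get_type_idx_for_query_alt (query : List String) : Int :=
  let indices := query.filterMap (fun t => PySem.Dict.get? tok2grp t)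
  match PySem.List.min? indices (fun x => x) with
  | some m => m
  | none => (token_groups.length : Int) - 1

-- ===== PRECONDITION & SPEC =====
def Spec_get_type_idx_for_query (query : List String) (out : Int) : Prop := out = get_type_idx_for_query_alt query
instance (query : List String) (out : Int) : Decidable (Spec_get_type_idx_for_query query out) := by unfold Spec_get_type_idx_for_query; infer_instance

-- ===== CLAIM (what is proved, stated in full; the proofs are below) =====
def Claim_equal_get_type_idx_for_query : Prop := ∀ (query : List String), Dom_get_type_idx_for_query query → Spec_get_type_idx_for_query query (get_type_idx_for_query query)

-- ===== LEMMAS AND PROOFS =====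

-- group 0 of token_groups, named for the proofs
def g0 : List String :=
  ["what","how","where","who","when","which","why","was","is","can","does","do","are","define","definition","meaning","mean"]

lemma tok2grp_eq : tok2grp = PySem.Dict.mk
    (g0.map (fun s => (s, (0:Int))) ++ [("---other---", 1)]) := by
  decide

lemma get_assoc (g : List String) (t : String) :
    (PySem.Dict.mk (g.map (fun s => (s, (0:Int))) ++ [("---other---", 1)])).get? t =
      if g.contains t then some 0
      else if t = "---other---" then some 1 else none := by
  induction g with
  | nil =>
    by_cases h : t = "---other---"
    · subst h; simp [PySem.Dict.get?_mk_cons]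
    · have h2 : ("---other---" == t) = false := by
        simp only [beq_eq_false_iff_ne]; exact fun hh => h hh.symm
      have h3 : (PySem.Dict.mk ([] : List (String × Int))).get? t = none := rfl
      simp [PySem.Dict.get?_mk_cons, h2, h3, h]
  | cons s ss ih =>
    by_cases h : t = s
    · subst h; simp [PySem.Dict.get?_mk_cons]
    · have h' : (s == t) = false := by
        simp only [beq_eq_false_iff_ne]; exact fun hh => h hh.symm
      have h'' : (t == s) = false := by simp only [beq_eq_false_iff_ne]; exact h
      simp only [List.map_cons, List.cons_append, PySem.Dict.get?_mk_cons,
        List.contains_cons, h', h'', Bool.false_or, ih]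
      simp

-- the lookup: some 0 for group-0 tokens, some 1 for "---other---", none otherwise
lemma tok2grp_get (t : String) :
    PySem.Dict.get? tok2grp t =
      if g0.contains t then some 0
      else if t = "---other---" then some 1 else none := by
  rw [tok2grp_eq]; exact get_assoc g0 t

lemma innerA_eq_any (g : List String) (q : List String) :
    innerA g q = q.any (fun t => g.contains t) := by
  induction q with
  | nil => rfl
  | cons t ts ih =>
    simp only [innerA, List.any_cons]
    by_cases h : g.contains t <;> simp [h, ih]

-- A's value: 0 if some query token lies in group 0, else 1
lemma a_char (q : List String) :
    get_type_idx_for_query q = if q.any (fun t => g0.contains t) then 0 else 1 := by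
  have hg : token_groups = [g0, ["---other---"]] := by rfl
  simp only [get_type_idx_for_query, hg, outerA, innerA_eq_any, List.length_cons,
    List.length_nil]
  norm_num

lemma foldl_min_binary (t : List Int) (x : Int)
    (hx : x = 0 ∨ x = 1) (ht : ∀ y ∈ t, y = 0 ∨ y = 1) :
    t.foldl min x = if x = 0 ∨ (0 : Int) ∈ t then 0 else 1 := by
  induction t generalizing x with
  | nil => rcases hx with h | h <;> simp [h]
  | cons y ys ih =>
    have hy := ht y (by simp)
    have hrec : List.foldl min (min x y) ys = if min x y = 0 ∨ (0:Int) ∈ ys then 0 else 1 := by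
      apply ih
      · rcases hx with h | h <;> rcases hy with h' | h' <;> subst h <;> subst h' <;> norm_num
      · exact fun z hz => ht z (by simp [hz])
    simp only [List.foldl_cons, hrec, List.mem_cons]
    rcases hx with h | h <;> rcases hy with h' | h' <;> subst h <;> subst h' <;> norm_num

-- B's value: same characterisation
lemma b_char (q : List String) :
    get_type_idx_for_query_alt q = if q.any (fun t => g0.contains t) then 0 else 1 := by
  simp only [get_type_idx_for_query_alt]
  have hall : ∀ y ∈ q.filterMap (fun t => PySem.Dict.get? tok2grp t), y = 0 ∨ y = (1:Int) := by
    intro y hy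
    rw [List.mem_filterMap] at hy
    obtain ⟨t, _, hget⟩ := hy
    rw [tok2grp_get] at hget
    split_ifs at hget <;> simp_all
  have h0 : (0:Int) ∈ q.filterMap (fun t => PySem.Dict.get? tok2grp t) ↔
      q.any (fun t => g0.contains t) = true := by
    rw [List.mem_filterMap, List.any_eq_true]
    constructor
    · rintro ⟨t, ht, hget⟩
      refine ⟨t, ht, ?_⟩
      rw [tok2grp_get] at hget
      by_cases hcg : g0.contains t
      · exact hcg
      · rw [if_neg hcg] at hget; split_ifs at hget <;> simp_all
    · rintro ⟨t, ht, hc⟩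
      exact ⟨t, ht, by rw [tok2grp_get, if_pos hc]⟩
  cases hc : q.filterMap (fun t => PySem.Dict.get? tok2grp t) with
  | nil =>
    rw [hc] at h0
    have hq : ¬ q.any (fun t => g0.contains t) = true := fun h => absurd (h0.mpr h) (by simp)
    simp only [PySem.List.min?]
    rw [if_neg hq]
    rfl
  | cons x xs =>
    rw [hc] at h0 hall
    rw [PySem.List.min?_id_cons,
      foldl_min_binary xs x (hall x (by simp)) (fun y hy => hall y (by simp [hy]))]
    by_cases hq : q.any (fun t => g0.contains t) = true
    · have h0m := h0.mpr hq
      simp only [List.mem_cons] at h0m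
      rw [if_pos hq, if_pos]
      tauto
    · have h0m : (0:Int) ∉ x :: xs := fun h => hq (h0.mp h)
      simp only [List.mem_cons, not_or] at h0m
      rw [if_neg hq, if_neg]
      tauto

-- ===== VERDICT (by name: the statement is the Claim_ definition above) =====
theorem get_type_idx_for_query_spec : Claim_equal_get_type_idx_for_query := by
  intro q _
  unfold Spec_get_type_idx_for_query
  rw [a_char, b_char]
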